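-- pv_equiv track=rewrite | github.com/TakibYeasar/Yeasar_Codeforces_problem_solving | Math/codeforces_1925B.py | solve
-- ===== SOURCE A (Python) =====
-- import math
--
-- def solve(x, n):
--
--     # Calculate all possible divisors of x, handling potential overflow using math.sqrt and int():
--     divisors = [i for i in range(1, int(math.sqrt(x)) + 1) if x % i == 0]
--     divisors.extend([x // i for i in divisors if i * i != x])
--
--     # Sort divisors in descending order:
--     divisors.sort(reverse=True)
--
--     # Find the first divisor that can be used to create n sub-problems:
--     max_balance = 0
--     for divisor in divisors:
--         if n <= x // divisor:  # Check if n is less than or equal to x divided by divisor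
--             max_balance = divisor
--             break
--
--     return max_balance
-- ===== SOURCE B (Python) =====
-- import math
--
-- def solve(x, n):
--     best = 0
--     for i in range(1, math.isqrt(x) + 1):
--         if x % i == 0:
--             for c in (i, x // i):
--                 if n <= x // c and c > best:
--                     best = c
--     return best
-- ===== Notes on version B (the rewrite author's own statement) =====
-- stated objective: simpler
-- what changed: B replaces A's build-full-divisor-list / descending-sort / break-on-first-match pipeline with a single pass over 1..isqrt(x) that keeps a running maximum qualifying divisor, checking both i and x//i directly.
import Mathlib
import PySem

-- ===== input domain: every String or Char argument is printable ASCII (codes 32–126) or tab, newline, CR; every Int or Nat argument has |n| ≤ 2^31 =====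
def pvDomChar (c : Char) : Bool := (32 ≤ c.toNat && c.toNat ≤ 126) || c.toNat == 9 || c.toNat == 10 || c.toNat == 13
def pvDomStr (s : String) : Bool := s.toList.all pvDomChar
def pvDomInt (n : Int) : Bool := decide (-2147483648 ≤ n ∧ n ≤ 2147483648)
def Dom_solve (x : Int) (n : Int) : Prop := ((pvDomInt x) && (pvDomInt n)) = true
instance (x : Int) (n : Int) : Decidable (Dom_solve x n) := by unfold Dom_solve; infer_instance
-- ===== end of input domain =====

-- B replaces A's build-divisor-list / sort-descending / break-on-first-match pipeline with a
-- single pass over 1..isqrt(x) keeping a running maximum qualifying divisor (objective: simpler).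

-- int(math.sqrt(x)) in A and math.isqrt(x) in B: exact (= floor of the real square root) for
-- every x with 0 ≤ x ≤ 2^31, since math.sqrt is correctly rounded and the gap to the nearest
-- perfect square exceeds the double ulp at this magnitude.
def pySqrt (x : Int) : Int := (Nat.sqrt x.toNat : Int)

-- ===== PORT A =====
-- the 'for divisor in divisors: if n <= x // divisor: max_balance = divisor; break'
def solveBreak (x n : Int) : List Int → Int → Int
  | [], mb => mb
  | d :: ds, mb => if n ≤ PySem.Int.floordiv x d then d else solveBreak x n ds mb

def solve (x : Int) (n : Int) : Int :=
  let small := (PySem.List.pyRange 1 (pySqrt x + 1) 1).filter (fun i => PySem.Int.mod x i == 0)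
  let divisors := small ++ (small.filter (fun i => i * i != x)).map (fun i => PySem.Int.floordiv x i)
  let sortedDesc := PySem.List.sorted divisors (fun d => d) true
  solveBreak x n sortedDesc 0

-- ===== PORT B =====
-- 'for c in (i, x // i): if n <= x // c and c > best: best = c'
def altStep (x n best i : Int) : Int :=
  if PySem.Int.mod x i = 0 then
    [i, PySem.Int.floordiv x i].foldl
      (fun b c => if n ≤ PySem.Int.floordiv x c ∧ b < c then c else b) best
  else best

def solve_alt (x : Int) (n : Int) : Int :=
  (PySem.List.pyRange 1 (pySqrt x + 1) 1).foldl (altStep x n) 0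

-- ===== PRECONDITION & SPEC =====
-- Pre_ excludes x < 0, on which A raises ValueError (math.sqrt of a negative number); B raises there too.
def Pre_solve (x : Int) (n : Int) : Prop := 0 ≤ x
instance (x : Int) (n : Int) : Decidable (Pre_solve x n) := by unfold Pre_solve; infer_instance
def pvWitness_solve : Int × Int := (12, 3)

def Spec_solve (x : Int) (n : Int) (out : Int) : Prop := out = solve_alt x n
instance (x : Int) (n : Int) (out : Int) : Decidable (Spec_solve x n out) := by unfold Spec_solve; infer_instance

-- ===== CLAIM (what is proved, stated in full; the proofs are below) =====
def Claim_equal_solve : Prop := ∀ (x : Int) (n : Int), Dom_solve x n → Pre_solve x n → Spec_solve x n (solve x n)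

-- ===== LEMMAS AND PROOFS =====

-- the per-element step both programs reduce to: "keep the max of b and d when d qualifies"
def gstep (x n b d : Int) : Int := if n ≤ PySem.Int.floordiv x d then max b d else b

-- the multiset of candidates B visits
def bcands (x : Int) : List Int :=
  (PySem.List.pyRange 1 (pySqrt x + 1) 1).flatMap
    (fun i => if PySem.Int.mod x i = 0 then [i, PySem.Int.floordiv x i] else [])

theorem le_foldl_max_init (l : List Int) (b : Int) : b ≤ l.foldl max b := by
  induction l generalizing b with
  | nil => exact le_refl _
  | cons d ds ih => exact le_trans (le_max_left b d) (ih _)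

theorem le_foldl_max_mem {l : List Int} {a : Int} (h : a ∈ l) (b : Int) : a ≤ l.foldl max b := by
  induction l generalizing b with
  | nil => cases h
  | cons d ds ih =>
    rcases List.mem_cons.mp h with rfl | h'
    · exact le_trans (le_max_right b a) (le_foldl_max_init ds _)
    · exact ih h' _

theorem foldl_max_le {l : List Int} {b c : Int} (hb : b ≤ c) (h : ∀ a ∈ l, a ≤ c) :
    l.foldl max b ≤ c := by
  induction l generalizing b with
  | nil => exact hb
  | cons d ds ih =>
    exact ih (max_le hb (h d (List.mem_cons_self))) (fun a ha => h a (List.mem_cons_of_mem _ ha))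

theorem foldl_max_eq_of_mem_iff {l₁ l₂ : List Int} (h : ∀ a, a ∈ l₁ ↔ a ∈ l₂) (b : Int) :
    l₁.foldl max b = l₂.foldl max b := by
  apply le_antisymm
  · exact foldl_max_le (le_foldl_max_init _ _) (fun a ha => le_foldl_max_mem ((h a).mp ha) _)
  · exact foldl_max_le (le_foldl_max_init _ _) (fun a ha => le_foldl_max_mem ((h a).mpr ha) _)

-- B's inner update is exactly gstep
theorem bupd_eq_gstep (x n b c : Int) :
    (if n ≤ PySem.Int.floordiv x c ∧ b < c then c else b) = gstep x n b c := by
  unfold gstep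
  split_ifs with h1 h2 h2 <;> omega

-- A's break-on-first-match over a descending list of positive divisors is the max of the qualifiers
theorem solveBreak_eq (x n : Int) (l : List Int)
    (hs : l.Pairwise (fun a b => b ≤ a)) (hp : ∀ a ∈ l, 1 ≤ a) :
    solveBreak x n l 0 = (l.filter (fun d => decide (n ≤ PySem.Int.floordiv x d))).foldl max 0 := by
  induction l with
  | nil => rfl
  | cons d ds ih =>
    rcases List.pairwise_cons.mp hs with ⟨hd, hs'⟩
    by_cases hq : n ≤ PySem.Int.floordiv x d
    · have hd1 : 1 ≤ d := hp d List.mem_cons_self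
      simp only [solveBreak, if_pos hq, List.filter_cons, decide_eq_true hq, if_true,
        List.foldl_cons]
      have h0d : max 0 d = d := by omega
      rw [h0d]
      refine (le_antisymm ?_ (le_foldl_max_init _ _)).symm
      exact foldl_max_le (le_refl d)
        (fun a ha => hd a (List.mem_of_mem_filter ha))
    · simp only [solveBreak, if_neg hq, List.filter_cons]
      rw [if_neg (by simpa using hq)]
      exact ih hs' (fun a ha => hp a (List.mem_cons_of_mem _ ha))

-- a fold over 'if p x then f acc x else acc' shape, via flatMap
theorem foldl_flatMap_eq {α β : Type} (G : α → List β) (g : β → β → β) (l : List α) (b : β) :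
    (l.flatMap G).foldl g b = l.foldl (fun acc i => (G i).foldl g acc) b := by
  induction l generalizing b with
  | nil => rfl
  | cons d ds ih => simp [List.flatMap_cons, List.foldl_append, ih]

-- facts about members of 'small'
theorem mem_small (x a : Int) :
    a ∈ (PySem.List.pyRange 1 (pySqrt x + 1) 1).filter (fun i => PySem.Int.mod x i == 0) ↔
      (1 ≤ a ∧ a ≤ pySqrt x ∧ PySem.Int.mod x a = 0) := by
  simp [List.mem_filter, PySem.List.mem_pyRange_one]
  omega

theorem small_sq_le (x a : Int) (h1 : 1 ≤ a) (h2 : a ≤ pySqrt x) : a * a ≤ x := by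
  unfold pySqrt at h2
  have ha : a.toNat ≤ Nat.sqrt x.toNat := by omega
  have := Nat.sqrt_le_sqrt (Nat.le_refl x.toNat)
  have hsq : a.toNat * a.toNat ≤ x.toNat := Nat.le_sqrt.mp ha
  have hx0 : (0:Int) ≤ x := by
    by_contra hx
    have : x.toNat = 0 := by omega
    rw [this] at ha
    simp [Nat.sqrt] at ha
    omega
  have : (a.toNat : Int) * (a.toNat : Int) ≤ (x.toNat : Int) := by exact_mod_cast hsq
  have h3 : (a.toNat : Int) = a := by omega
  have h4 : (x.toNat : Int) = x := by omega
  rw [h3, h4] at this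
  exact this

theorem small_codiv_ge_one (x a : Int) (h1 : 1 ≤ a) (h2 : a ≤ pySqrt x) :
    1 ≤ PySem.Int.floordiv x a := by
  rw [PySem.Int.le_floordiv_iff_mul_le (by omega)]
  have := small_sq_le x a h1 h2
  nlinarith

theorem codiv_eq_of_sq (x a : Int) (h1 : 1 ≤ a) (hsq : a * a = x) :
    PySem.Int.floordiv x a = a := by
  rw [PySem.Int.floordiv_eq_iff_of_pos (by omega)]
  constructor
  · omega
  · nlinarith

-- every member of A's divisor list is ≥ 1, and membership there matches B's candidate list
theorem divisors_pos (x a : Int)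
    (ha : a ∈ (let small := (PySem.List.pyRange 1 (pySqrt x + 1) 1).filter (fun i => PySem.Int.mod x i == 0)
               small ++ (small.filter (fun i => i * i != x)).map (fun i => PySem.Int.floordiv x i))) :
    1 ≤ a := by
  simp only [List.mem_append, List.mem_map, List.mem_filter] at ha
  rcases ha with h | ⟨i, ⟨hi, _⟩, rfl⟩
  · exact ((mem_small x a).mp (List.mem_filter.mpr h)).1
  · rcases (mem_small x i).mp (List.mem_filter.mpr hi) with ⟨h1, h2, _⟩
    exact small_codiv_ge_one x i h1 h2

theorem mem_divisors_iff_bcands (x a : Int) :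
    a ∈ (let small := (PySem.List.pyRange 1 (pySqrt x + 1) 1).filter (fun i => PySem.Int.mod x i == 0)
         small ++ (small.filter (fun i => i * i != x)).map (fun i => PySem.Int.floordiv x i)) ↔
      a ∈ bcands x := by
  simp only [List.mem_append, List.mem_map, List.mem_filter, bcands, List.mem_flatMap]
  constructor
  · rintro (h | ⟨i, ⟨hi, hne⟩, rfl⟩)
    · rcases (mem_small x a).mp (List.mem_filter.mpr h) with ⟨h1, h2, h3⟩
      exact ⟨a, by simp [PySem.List.mem_pyRange_one]; omega,
        by rw [if_pos h3]; simp⟩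
    · rcases (mem_small x i).mp (List.mem_filter.mpr hi) with ⟨h1, h2, h3⟩
      exact ⟨i, by simp [PySem.List.mem_pyRange_one]; omega,
        by rw [if_pos h3]; simp⟩
  · rintro ⟨i, hir, hmem⟩
    rw [PySem.List.mem_pyRange_one] at hir
    by_cases hdvd : PySem.Int.mod x i = 0
    · rw [if_pos hdvd] at hmem
      have hi : i ∈ (PySem.List.pyRange 1 (pySqrt x + 1) 1).filter (fun i => PySem.Int.mod x i == 0) :=
        (mem_small x i).mpr ⟨by omega, by omega, hdvd⟩
      simp only [List.mem_cons, List.not_mem_nil, or_false] at hmem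
      rcases hmem with rfl | rfl
      · exact Or.inl (List.mem_filter.mp hi)
      · by_cases hsq : i * i = x
        · left
          rw [codiv_eq_of_sq x i (by omega) hsq]
          exact List.mem_filter.mp hi
        · exact Or.inr ⟨i, ⟨List.mem_filter.mp hi, by simpa using hsq⟩, rfl⟩
    · rw [if_neg hdvd] at hmem
      cases hmem

-- ===== VERDICT (by name: the statement is the Claim_ definition above) =====
theorem solve_spec : Claim_equal_solve := by
  intro x n _ _
  unfold Spec_solve
  -- reduce A to a fold of gstep over its divisor list
  show solve x n = solve_alt x n
  unfold solve
  set small := (PySem.List.pyRange 1 (pySqrt x + 1) 1).filter (fun i => PySem.Int.mod x i == 0) with hsmall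
  set divisors := small ++ (small.filter (fun i => i * i != x)).map (fun i => PySem.Int.floordiv x i) with hdiv
  have hA : solveBreak x n (PySem.List.sorted divisors (fun d => d) true) 0
      = (divisors.filter (fun d => decide (n ≤ PySem.Int.floordiv x d))).foldl max 0 := by
    rw [solveBreak_eq x n _ (PySem.List.sorted_pairwise_rev divisors (fun d => d))
      (fun a ha => divisors_pos x a (by
        rw [PySem.List.mem_sorted] at ha
        simpa [hdiv, hsmall] using ha))]
    exact foldl_max_eq_of_mem_iff
      (fun a => by simp [List.mem_filter, PySem.List.mem_sorted]) 0
  rw [hA]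
  -- reduce B to a fold of gstep over its candidate list
  have hB : solve_alt x n = (bcands x).foldl (gstep x n) 0 := by
    unfold solve_alt bcands
    rw [foldl_flatMap_eq]
    apply PySem.List.foldl_congr_mem
    intro acc i _
    unfold altStep
    by_cases hdvd : PySem.Int.mod x i = 0
    · rw [if_pos hdvd, if_pos hdvd]
      simp only [List.foldl, bupd_eq_gstep]
    · rw [if_neg hdvd, if_neg hdvd]
      rfl
  rw [hB]
  have hC : (bcands x).foldl (gstep x n) 0
      = ((bcands x).filter (fun d => decide (n ≤ PySem.Int.floordiv x d))).foldl max 0 := by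
    unfold gstep
    exact PySem.List.foldl_ite_eq_foldl_filter (p := fun d => n ≤ PySem.Int.floordiv x d)
      (f := max) (l := bcands x) (init := 0)
  rw [hC]
  exact foldl_max_eq_of_mem_iff
    (fun a => by
      simp only [List.mem_filter]
      constructor
      · rintro ⟨h1, h2⟩
        exact ⟨(mem_divisors_iff_bcands x a).mp (by simpa [hdiv, hsmall] using h1), h2⟩
      · rintro ⟨h1, h2⟩
        exact ⟨by simpa [hdiv, hsmall] using (mem_divisors_iff_bcands x a).mpr h1, h2⟩) 0
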